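-- pv_equiv track=rewrite | github.com/yusangho76-coder/smartbrief | src/flight_info_extractor.py | _split_by_packages
-- ===== SOURCE A (Python) =====
-- from typing import Dict, List, Optional, Any
--
-- def _split_by_packages(lines: List[str]) -> Dict[str, List[str]]:
--     """PACKAGE별로 라인 분리"""
--     package_sections = {}
--     current_package = None
--     current_lines = []
--
--     for i, line in enumerate(lines):
--         line_upper = line.upper().strip()
--
--         # PACKAGE 헤더 감지
--         if 'PACKAGE' in line_upper and ('PACKAGE 1' in line_upper or 'PACKAGE 2' in line_upper or 'PACKAGE 3' in line_upper):
--             # 이전 PACKAGE 저장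
--             if current_package and current_lines:
--                 package_sections[current_package] = current_lines
--
--             # 새 PACKAGE 시작
--             if 'PACKAGE 1' in line_upper:
--                 current_package = 'PACKAGE 1'
--             elif 'PACKAGE 2' in line_upper:
--                 current_package = 'PACKAGE 2'
--             elif 'PACKAGE 3' in line_upper:
--                 current_package = 'PACKAGE 3'
--             else:
--                 current_package = None
--
--             current_lines = []
--             # PACKAGE 헤더 자체는 포함하지 않음
--             continue
--
--         # PACKAGE 1 끝 감지 (END OF KOREAN AIR NOTAM PACKAGE 1)
--         if 'END OF KOREAN AIR NOTAM PACKAGE 1' in line_upper: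
--             # PACKAGE 1 저장
--             if current_package == 'PACKAGE 1' and current_lines:
--                 package_sections[current_package] = current_lines
--             current_package = None
--             current_lines = []
--             continue
--
--         # PACKAGE 내 라인 추가
--         if current_package:
--             current_lines.append(line)
--
--     # 마지막 PACKAGE 저장
--     if current_package and current_lines:
--         package_sections[current_package] = current_lines
--
--     return package_sections
-- ===== SOURCE B (Python) =====
-- def _split_by_packages(lines):
--     """Split lines into PACKAGE sections: resolve headers once, then take spans
--     of non-header lines as segments (only non-empty ones are kept)."""
--
--     def header_name(line):
--         u = line.upper().strip()
--         if 'PACKAGE' in u: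
--             for name in ('PACKAGE 1', 'PACKAGE 2', 'PACKAGE 3'):
--                 if name in u:
--                     return name
--         return None
--
--     def span_nonheader(xs):
--         # longest prefix of non-header lines, and the remainder
--         seg = []
--         for k, x in enumerate(xs):
--             if header_name(x) is not None:
--                 return seg, xs[k:]
--             seg.append(x)
--         return seg, []
--
--     sections = {}
--     _, rest = span_nonheader(lines)   # discard everything before the first header
--     while rest:
--         name = header_name(rest[0])
--         seg, rest = span_nonheader(rest[1:])
--         if seg:
--             sections[name] = seg
--     return sections
-- ===== Notes on version B (the rewrite author's own statement) =====
-- stated objective: alternative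
-- what changed: Replaced A's single stateful scan (current_package/current_lines accumulator with a dead END-marker branch) by a two-level decomposition: a header_name resolver plus repeated spans of non-header lines taken directly as the segments, inserting each non-empty span under its header's name.
import Mathlib
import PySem

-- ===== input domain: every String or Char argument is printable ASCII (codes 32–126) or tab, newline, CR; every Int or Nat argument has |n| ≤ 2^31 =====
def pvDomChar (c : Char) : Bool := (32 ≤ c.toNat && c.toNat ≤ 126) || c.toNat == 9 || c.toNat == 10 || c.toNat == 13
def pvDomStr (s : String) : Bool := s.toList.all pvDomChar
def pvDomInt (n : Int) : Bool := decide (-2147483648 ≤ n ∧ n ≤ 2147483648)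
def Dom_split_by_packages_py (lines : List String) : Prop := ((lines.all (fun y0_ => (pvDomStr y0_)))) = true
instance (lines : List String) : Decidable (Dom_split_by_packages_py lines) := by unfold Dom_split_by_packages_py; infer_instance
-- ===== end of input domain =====

-- B re-decomposes A's one stateful scan into header-resolution plus spans of non-header
-- lines taken as segments (objective: alternative decomposition, same asymptotic cost).

-- ===== PORT A =====
-- state: (dict so far, current_package, current_lines); one pass over the lines
def split_by_packages_go : List String → PySem.Dict String (List String) → Option String → List String → PySem.Dict String (List String)
  | [], d, cur, acc =>
      -- final save
      (match cur with
       | some name => if name ≠ "" ∧ acc ≠ [] then d.insert name acc else d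
       | none => d)
  | line :: rest, d, cur, acc =>
      let u := PySem.Str.strip (PySem.Str.upper line)
      if PySem.Str.isIn "PACKAGE" u &&
         (PySem.Str.isIn "PACKAGE 1" u || PySem.Str.isIn "PACKAGE 2" u || PySem.Str.isIn "PACKAGE 3" u) then
        -- save previous package
        let d' := (match cur with
          | some name => if name ≠ "" ∧ acc ≠ [] then d.insert name acc else d
          | none => d)
        -- start new package
        let cur' : Option String :=
          if PySem.Str.isIn "PACKAGE 1" u then some "PACKAGE 1"
          else if PySem.Str.isIn "PACKAGE 2" u then some "PACKAGE 2"
          else if PySem.Str.isIn "PACKAGE 3" u then some "PACKAGE 3"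
          else none
        split_by_packages_go rest d' cur' []
      else if PySem.Str.isIn "END OF KOREAN AIR NOTAM PACKAGE 1" u then
        let d' := if cur = some "PACKAGE 1" ∧ acc ≠ [] then d.insert "PACKAGE 1" acc else d
        split_by_packages_go rest d' none []
      else
        match cur with
        | some name =>
            if name ≠ "" then split_by_packages_go rest d (some name) (acc ++ [line])
            else split_by_packages_go rest d (some name) acc
        | none => split_by_packages_go rest d none acc

def split_by_packages_py (lines : List String) : List (String × List String) :=
  (split_by_packages_go lines PySem.Dict.empty none []).items

-- ===== PORT B =====
-- header_name: resolved package name of a header line, none otherwise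
def pvHdrCore (u : String) : Option String :=
  if PySem.Str.isIn "PACKAGE" u then
    if PySem.Str.isIn "PACKAGE 1" u then some "PACKAGE 1"
    else if PySem.Str.isIn "PACKAGE 2" u then some "PACKAGE 2"
    else if PySem.Str.isIn "PACKAGE 3" u then some "PACKAGE 3"
    else none
  else none

def pvHdrName (line : String) : Option String :=
  pvHdrCore (PySem.Str.strip (PySem.Str.upper line))

-- span_nonheader: longest prefix of non-header lines, and the remainder
def pvSpan : List String → List String × List String
  | [] => ([], [])
  | x :: xs =>
      if (pvHdrName x).isSome then ([], x :: xs)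
      else ((x :: (pvSpan xs).1), (pvSpan xs).2)

theorem pvSpan_snd_length_le (xs : List String) : (pvSpan xs).2.length ≤ xs.length := by
  induction xs with
  | nil => simp [pvSpan]
  | cons x xs ih =>
      simp only [pvSpan]
      split
      · simp
      · simpa using Nat.le_succ_of_le ih

-- the while loop: rest is [] or starts with a header
def pvBGo : List String → PySem.Dict String (List String) → PySem.Dict String (List String)
  | [], d => d
  | r :: rest, d =>
      let p := pvSpan rest
      let d' := match pvHdrName r with
        | some name => if p.1 = [] then d else d.insert name p.1
        | none => d   -- unreachable: the remainder of pvSpan starts with a header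
      pvBGo p.2 d'
  termination_by xs _ => xs.length
  decreasing_by
    simpa using Nat.lt_succ_of_le (pvSpan_snd_length_le rest)

def split_by_packages_py_alt (lines : List String) : List (String × List String) :=
  (pvBGo (pvSpan lines).2 PySem.Dict.empty).items

-- ===== PRECONDITION & SPEC =====
def Spec_split_by_packages_py (lines : List String) (out : List (String × List String)) : Prop := out = split_by_packages_py_alt lines
instance (lines : List String) (out : List (String × List String)) : Decidable (Spec_split_by_packages_py lines out) := by unfold Spec_split_by_packages_py; infer_instance

-- ===== CLAIM (what is proved, stated in full; the proofs are below) =====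
def Claim_equal_split_by_packages_py : Prop := ∀ (lines : List String), Dom_split_by_packages_py lines → Spec_split_by_packages_py lines (split_by_packages_py lines)

-- ===== LEMMAS AND PROOFS =====

-- A's header condition is pvHdrName's definedness
theorem hdr_isSome (u : String) :
    (pvHdrCore u).isSome = (PySem.Str.isIn "PACKAGE" u &&
      (PySem.Str.isIn "PACKAGE 1" u || PySem.Str.isIn "PACKAGE 2" u || PySem.Str.isIn "PACKAGE 3" u)) := by
  unfold pvHdrCore
  by_cases h : PySem.Str.isIn "PACKAGE" u = true <;>
  by_cases h1 : PySem.Str.isIn "PACKAGE 1" u = true <;>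
  by_cases h2 : PySem.Str.isIn "PACKAGE 2" u = true <;>
  by_cases h3 : PySem.Str.isIn "PACKAGE 3" u = true <;>
  simp_all

-- A's name-resolution chain is pvHdrCore when "PACKAGE" is present
theorem hdr_chain (u : String) (h : PySem.Str.isIn "PACKAGE" u = true) :
    (if PySem.Str.isIn "PACKAGE 1" u then some "PACKAGE 1"
     else if PySem.Str.isIn "PACKAGE 2" u then some "PACKAGE 2"
     else if PySem.Str.isIn "PACKAGE 3" u then some "PACKAGE 3"
     else none) = pvHdrCore u := by
  unfold pvHdrCore; rw [if_pos h]

theorem hdr_ne_empty (line : String) (n : String) (h : pvHdrName line = some n) : n ≠ "" := by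
  unfold pvHdrName pvHdrCore at h
  repeat' split at h
  all_goals simp_all
  all_goals (subst h; decide)

-- the END marker contains "PACKAGE 1", so it is itself a header line
theorem end_implies_header (u : String)
    (h : PySem.Str.isIn "END OF KOREAN AIR NOTAM PACKAGE 1" u = true) :
    PySem.Str.isIn "PACKAGE" u = true ∧ PySem.Str.isIn "PACKAGE 1" u = true := by
  rw [PySem.Str.isIn_iff_infix] at h ⊢
  rw [PySem.Str.isIn_iff_infix]
  exact ⟨List.IsInfix.trans (by decide) h, List.IsInfix.trans (by decide) h⟩

-- inside a package: A's scan equals "finish the current span, then continue as B"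
theorem go_some (lines : List String) :
    ∀ (d : PySem.Dict String (List String)) (name : String) (acc : List String), name ≠ "" →
    split_by_packages_go lines d (some name) acc =
      pvBGo (pvSpan lines).2
        (if acc ++ (pvSpan lines).1 = [] then d else d.insert name (acc ++ (pvSpan lines).1)) := by
  induction lines with
  | nil =>
      intro d name acc hn
      simp only [split_by_packages_go, pvSpan, List.append_nil]
      by_cases hacc : acc = [] <;> simp [pvBGo, hn, hacc]
  | cons l rest ih =>
      intro d name acc hn
      cases hh : pvHdrName l with
      | some m =>
          have hm := hdr_ne_empty l m hh
          have hs : (pvHdrCore (PySem.Str.strip (PySem.Str.upper l))).isSome = true := by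
            rw [show pvHdrCore (PySem.Str.strip (PySem.Str.upper l)) = pvHdrName l from rfl, hh]
            rfl
          have hc := (hdr_isSome (PySem.Str.strip (PySem.Str.upper l))).symm.trans hs
          have hp : PySem.Str.isIn "PACKAGE" (PySem.Str.strip (PySem.Str.upper l)) = true :=
            ((Bool.and_eq_true _ _).mp hc).1
          have hchain :
              (if PySem.Str.isIn "PACKAGE 1" (PySem.Str.strip (PySem.Str.upper l)) then some "PACKAGE 1"
               else if PySem.Str.isIn "PACKAGE 2" (PySem.Str.strip (PySem.Str.upper l)) then some "PACKAGE 2"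
               else if PySem.Str.isIn "PACKAGE 3" (PySem.Str.strip (PySem.Str.upper l)) then some "PACKAGE 3"
               else none) = some m := by
            rw [hdr_chain _ hp]; exact hh
          simp only [split_by_packages_go, hc, if_true, hchain]
          rw [ih _ m [] hm]
          conv_rhs => simp only [pvSpan, hh, Option.isSome_some, if_true]
          rw [pvBGo]
          simp only [hh]
          by_cases hacc : acc = [] <;> simp [hn, hacc]
      | none =>
          have hs : (pvHdrCore (PySem.Str.strip (PySem.Str.upper l))).isSome = false := by
            rw [show pvHdrCore (PySem.Str.strip (PySem.Str.upper l)) = pvHdrName l from rfl, hh]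
            rfl
          have hc := (hdr_isSome (PySem.Str.strip (PySem.Str.upper l))).symm.trans hs
          have hE : PySem.Str.isIn "END OF KOREAN AIR NOTAM PACKAGE 1"
              (PySem.Str.strip (PySem.Str.upper l)) = false := by
            by_contra hE'
            have hE2 : PySem.Str.isIn "END OF KOREAN AIR NOTAM PACKAGE 1"
                (PySem.Str.strip (PySem.Str.upper l)) = true := by
              simpa using hE'
            obtain ⟨h1, h2⟩ := end_implies_header _ hE2
            rw [h1, h2] at hc
            simp at hc
          simp only [split_by_packages_go, hc, hE, Bool.false_eq_true, if_false, hn, if_true,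
            ne_eq, not_false_iff]
          rw [ih d name (acc ++ [l]) hn]
          simp [pvSpan, hh]

-- outside a package: A's scan equals B's loop on the rest after the dropped prefix
theorem go_none (lines : List String) :
    ∀ (d : PySem.Dict String (List String)) (acc : List String),
    split_by_packages_go lines d none acc = pvBGo (pvSpan lines).2 d := by
  induction lines with
  | nil => intro d acc; simp [split_by_packages_go, pvSpan, pvBGo]
  | cons l rest ih =>
      intro d acc
      cases hh : pvHdrName l with
      | some m =>
          have hm := hdr_ne_empty l m hh
          have hs : (pvHdrCore (PySem.Str.strip (PySem.Str.upper l))).isSome = true := by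
            rw [show pvHdrCore (PySem.Str.strip (PySem.Str.upper l)) = pvHdrName l from rfl, hh]
            rfl
          have hc := (hdr_isSome (PySem.Str.strip (PySem.Str.upper l))).symm.trans hs
          have hp : PySem.Str.isIn "PACKAGE" (PySem.Str.strip (PySem.Str.upper l)) = true :=
            ((Bool.and_eq_true _ _).mp hc).1
          have hchain :
              (if PySem.Str.isIn "PACKAGE 1" (PySem.Str.strip (PySem.Str.upper l)) then some "PACKAGE 1"
               else if PySem.Str.isIn "PACKAGE 2" (PySem.Str.strip (PySem.Str.upper l)) then some "PACKAGE 2"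
               else if PySem.Str.isIn "PACKAGE 3" (PySem.Str.strip (PySem.Str.upper l)) then some "PACKAGE 3"
               else none) = some m := by
            rw [hdr_chain _ hp]; exact hh
          simp only [split_by_packages_go, hc, if_true, hchain]
          rw [go_some rest d m [] hm]
          conv_rhs => simp only [pvSpan, hh, Option.isSome_some, if_true]
          rw [pvBGo]
          simp only [hh]
          by_cases hseg : (pvSpan rest).1 = [] <;> simp [hseg]
      | none =>
          have hs : (pvHdrCore (PySem.Str.strip (PySem.Str.upper l))).isSome = false := by
            rw [show pvHdrCore (PySem.Str.strip (PySem.Str.upper l)) = pvHdrName l from rfl, hh]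
            rfl
          have hc := (hdr_isSome (PySem.Str.strip (PySem.Str.upper l))).symm.trans hs
          by_cases hE : PySem.Str.isIn "END OF KOREAN AIR NOTAM PACKAGE 1"
              (PySem.Str.strip (PySem.Str.upper l)) = true
          · simp only [split_by_packages_go, hc, hE, Bool.false_eq_true, if_false, if_true]
            rw [if_neg (by simp)]
            rw [ih d []]
            simp [pvSpan, hh]
          · simp only [split_by_packages_go, hc, eq_false_of_ne_true hE, Bool.false_eq_true, if_false]
            rw [ih d acc]
            simp [pvSpan, hh]

-- ===== VERDICT (by name: the statement is the Claim_ definition above) =====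
theorem split_by_packages_py_spec : Claim_equal_split_by_packages_py := by
  intro lines _
  unfold Spec_split_by_packages_py split_by_packages_py split_by_packages_py_alt
  rw [go_none]
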